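-- pv_equiv track=rewrite | github.com/Artist193/FYP | backend/connected_devices/services.py | _classify_device_real
-- ===== SOURCE A (Python) =====
-- def _classify_device_real(vendor: str, hostname: str, ip: str) -> str:
--     """REAL device classification based on actual data"""
--     vendor_lower = (vendor or "").lower()
--     hostname_lower = (hostname or "").lower()
--
--     # Router detection (usually .1 and common router vendors)
--     if (ip.endswith('.1') or
--         any(word in vendor_lower for word in ['router', 'gateway', 'cisco', 'netgear', 'tplink', 'd-link', 'linksys', 'ubiquiti', 'arris']) or
--         any(word in hostname_lower for word in ['router', 'gateway', 'modem'])):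
--         return 'router'
--
--     # IoT devices
--     iot_keywords = ['smart', 'iot', 'hue', 'philips', 'nest', 'ring', 'arlo', 'roku',
--                    'echo', 'alexa', 'google home', 'smartthings', 'wyze', 'blink',
--                    'wemo', 'kasa', 'tuya', 'smartlife', 'yeelight', 'xiaomi',
--                    'sensor', 'camera', 'thermostat', 'plug', 'switch', 'bulb', 'doorbell',
--                    'printer', 'tv', 'speaker', 'media', 'streaming']
--
--     for keyword in iot_keywords:
--         if keyword in vendor_lower or keyword in hostname_lower:
--             return 'iot'
--
--     # Mobile devices
--     if any(word in vendor_lower for word in ['apple', 'samsung', 'android', 'xiaomi', 'huawei', 'oneplus', 'google', 'pixel']):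
--         return 'mobile'
--
--     # Computers
--     if any(word in vendor_lower for word in ['microsoft', 'dell', 'lenovo', 'hp', 'asus', 'acer', 'toshiba', 'computer', 'laptop']):
--         return 'computer'
--
--     # Printers
--     if any(word in vendor_lower for word in ['hp', 'epson', 'canon', 'brother', 'lexmark', 'printer']):
--         return 'printer'
--
--     return 'unknown'
-- ===== SOURCE B (Python) =====
-- def _classify_device_real(vendor: str, hostname: str, ip: str) -> str:
--     """Single accumulator pass: scan one flat list of (priority, text, keywords)
--     checks and keep the minimum matched priority; no early returns or cascade."""
--     v = (vendor or "").lower()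
--     h = (hostname or "").lower()
--     IOT = ['smart', 'iot', 'hue', 'philips', 'nest', 'ring', 'arlo', 'roku',
--            'echo', 'alexa', 'google home', 'smartthings', 'wyze', 'blink',
--            'wemo', 'kasa', 'tuya', 'smartlife', 'yeelight', 'xiaomi',
--            'sensor', 'camera', 'thermostat', 'plug', 'switch', 'bulb', 'doorbell',
--            'printer', 'tv', 'speaker', 'media', 'streaming']
--     checks = [
--         (0, v, ['router', 'gateway', 'cisco', 'netgear', 'tplink',
--                 'd-link', 'linksys', 'ubiquiti', 'arris']),
--         (0, h, ['router', 'gateway', 'modem']),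
--         (1, v, IOT),
--         (1, h, IOT),
--         (2, v, ['apple', 'samsung', 'android', 'xiaomi', 'huawei',
--                 'oneplus', 'google', 'pixel']),
--         (3, v, ['microsoft', 'dell', 'lenovo', 'hp', 'asus', 'acer',
--                 'toshiba', 'computer', 'laptop']),
--         (4, v, ['hp', 'epson', 'canon', 'brother', 'lexmark', 'printer']),
--     ]
--     labels = ['router', 'iot', 'mobile', 'computer', 'printer', 'unknown']
--     best = 0 if ip.endswith('.1') else 5
--     for pri, text, kws in checks:
--         if pri < best and any(k in text for k in kws):
--             best = pri
--     return labels[best]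
-- ===== Notes on version B (the rewrite author's own statement) =====
-- stated objective: alternative
-- what changed: Replaces A's early-return branch cascade (ifs plus an iot for-loop, each returning immediately) by a single accumulator pass: one flat list of (priority, text, keywords) checks is scanned once keeping the minimum matched priority, and the label is looked up by that index at the end.
import Mathlib
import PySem

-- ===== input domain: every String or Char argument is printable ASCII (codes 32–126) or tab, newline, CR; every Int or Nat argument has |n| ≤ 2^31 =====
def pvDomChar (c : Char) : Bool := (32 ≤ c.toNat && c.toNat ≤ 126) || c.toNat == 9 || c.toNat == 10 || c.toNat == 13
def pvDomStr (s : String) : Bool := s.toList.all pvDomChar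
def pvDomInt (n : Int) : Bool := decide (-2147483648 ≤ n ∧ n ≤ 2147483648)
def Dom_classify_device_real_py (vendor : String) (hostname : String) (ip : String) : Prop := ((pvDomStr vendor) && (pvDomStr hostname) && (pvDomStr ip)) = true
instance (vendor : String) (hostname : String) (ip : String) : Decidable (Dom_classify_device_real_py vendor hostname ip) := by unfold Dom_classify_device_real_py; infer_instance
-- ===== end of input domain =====

-- B replaces A's early-return branch cascade by a single accumulator pass over a flat list of
-- (priority, text, keywords) checks, keeping the minimum matched priority (objective: alternative).

-- ===== PORT A =====
-- the keyword lists (module literals in the Python, named here so the ports stay readable)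
def pvRouterV : List String :=
  ["router", "gateway", "cisco", "netgear", "tplink", "d-link", "linksys", "ubiquiti", "arris"]
def pvRouterH : List String := ["router", "gateway", "modem"]
def pvIotKws : List String :=
  ["smart", "iot", "hue", "philips", "nest", "ring", "arlo", "roku",
   "echo", "alexa", "google home", "smartthings", "wyze", "blink",
   "wemo", "kasa", "tuya", "smartlife", "yeelight", "xiaomi",
   "sensor", "camera", "thermostat", "plug", "switch", "bulb", "doorbell",
   "printer", "tv", "speaker", "media", "streaming"]
def pvMobileKws : List String :=
  ["apple", "samsung", "android", "xiaomi", "huawei", "oneplus", "google", "pixel"]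
def pvComputerKws : List String :=
  ["microsoft", "dell", "lenovo", "hp", "asus", "acer", "toshiba", "computer", "laptop"]
def pvPrinterKws : List String := ["hp", "epson", "canon", "brother", "lexmark", "printer"]

-- A's iot for-loop with early return: first keyword found in vendor or hostname gives 'iot'.
def pvIotLoopA (vl hl : String) : List String → Option String
  | [] => none
  | k :: rest =>
    if PySem.Str.isIn k vl || PySem.Str.isIn k hl then some "iot" else pvIotLoopA vl hl rest

def classify_device_real_py (vendor : String) (hostname : String) (ip : String) : String :=
  -- '(vendor or "")' on a str is the string itself when nonempty, '' otherwise
  let vendor_lower := PySem.Str.lower (if vendor == "" then "" else vendor)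
  let hostname_lower := PySem.Str.lower (if hostname == "" then "" else hostname)
  if PySem.Str.endswith ip ".1"
      || (pvRouterV.any (fun w => PySem.Str.isIn w vendor_lower))
      || (pvRouterH.any (fun w => PySem.Str.isIn w hostname_lower)) then
    "router"
  else
    match pvIotLoopA vendor_lower hostname_lower pvIotKws with
    | some s => s
    | none =>
      if pvMobileKws.any (fun w => PySem.Str.isIn w vendor_lower) then "mobile"
      else if pvComputerKws.any (fun w => PySem.Str.isIn w vendor_lower) then "computer"
      else if pvPrinterKws.any (fun w => PySem.Str.isIn w vendor_lower) then "printer"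
      else "unknown"

-- ===== PORT B =====
-- B's single loop: 'for pri, text, kws in checks: if pri < best and any(...): best = pri'
def pvBestLoop : List (Nat × String × List String) → Nat → Nat
  | [], best => best
  | (pri, text, kws) :: rest, best =>
    pvBestLoop rest (if pri < best && kws.any (fun k => PySem.Str.isIn k text) then pri else best)

def classify_device_real_py_alt (vendor : String) (hostname : String) (ip : String) : String :=
  let v := PySem.Str.lower (if vendor == "" then "" else vendor)
  let h := PySem.Str.lower (if hostname == "" then "" else hostname)
  let checks : List (Nat × String × List String) :=
    [(0, v, pvRouterV), (0, h, pvRouterH),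
     (1, v, pvIotKws), (1, h, pvIotKws),
     (2, v, pvMobileKws), (3, v, pvComputerKws), (4, v, pvPrinterKws)]
  let labels := ["router", "iot", "mobile", "computer", "printer", "unknown"]
  let best := pvBestLoop checks (if PySem.Str.endswith ip ".1" then 0 else 5)
  -- labels[best]: best is always ≤ 5, so the index is in range
  labels.getD best ""

-- ===== PRECONDITION & SPEC =====
def Spec_classify_device_real_py (vendor : String) (hostname : String) (ip : String) (out : String) : Prop := out = classify_device_real_py_alt vendor hostname ip
instance (vendor : String) (hostname : String) (ip : String) (out : String) : Decidable (Spec_classify_device_real_py vendor hostname ip out) := by unfold Spec_classify_device_real_py; infer_instance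

-- ===== CLAIM (what is proved, stated in full; the proofs are below) =====
def Claim_equal_classify_device_real_py : Prop := ∀ (vendor : String) (hostname : String) (ip : String), Dom_classify_device_real_py vendor hostname ip → Spec_classify_device_real_py vendor hostname ip (classify_device_real_py vendor hostname ip)

-- ===== LEMMAS AND PROOFS =====

-- A's early-return iot loop is 'iot' iff some keyword matches either field.
theorem pvIotLoopA_eq (vl hl : String) (ks : List String) :
    pvIotLoopA vl hl ks
      = if ks.any (fun k => PySem.Str.isIn k vl || PySem.Str.isIn k hl) then some "iot" else none := by
  induction ks with
  | nil => simp [pvIotLoopA]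
  | cons k rest ih =>
    rw [pvIotLoopA, ih, List.any_cons]
    cases h : (PySem.Str.isIn k vl || PySem.Str.isIn k hl) <;> simp

-- any over a disjunction splits into a disjunction of anys.
theorem any_or_split (ks : List String) (f g : String → Bool) :
    ks.any (fun k => f k || g k) = (ks.any f || ks.any g) := by
  induction ks with
  | nil => rfl
  | cons k rest ih =>
    simp only [List.any_cons, ih]
    cases f k <;> cases g k <;> simp

-- one update step of B's accumulator loop, with the match outcome abstracted to a Bool
def pvStep (pri : Nat) (m : Bool) (best : Nat) : Nat := if pri < best && m then pri else best

theorem pvBestLoop_cons (pri : Nat) (text : String) (kws : List String)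
    (rest : List (Nat × String × List String)) (best : Nat) :
    pvBestLoop ((pri, text, kws) :: rest) best
      = pvBestLoop rest (pvStep pri (kws.any (fun k => PySem.Str.isIn k text)) best) := rfl

theorem pvBestLoop_nil (best : Nat) : pvBestLoop [] best = best := rfl

-- The whole comparison reduced to its boolean skeleton: A's cascade vs B's min-accumulator chain.
theorem pvShape (e b2 b3 b4 b5 b6 b7 b8 : Bool) :
    (if e || b2 || b3 then "router"
     else match (if b4 || b5 then some "iot" else (none : Option String)) with
          | some s => s
          | none =>
            if b6 then "mobile"
            else if b7 then "computer"
            else if b8 then "printer" else "unknown")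
    = (["router", "iot", "mobile", "computer", "printer", "unknown"].getD
        (pvStep 4 b8 (pvStep 3 b7 (pvStep 2 b6 (pvStep 1 b5 (pvStep 1 b4
          (pvStep 0 b3 (pvStep 0 b2 (if e then 0 else 5)))))))) "") := by
  revert e b2 b3 b4 b5 b6 b7 b8; decide

theorem classify_eq (vendor hostname ip : String) :
    classify_device_real_py vendor hostname ip = classify_device_real_py_alt vendor hostname ip := by
  unfold classify_device_real_py classify_device_real_py_alt
  simp only [pvIotLoopA_eq, any_or_split, pvBestLoop_cons, pvBestLoop_nil]
  exact pvShape _ _ _ _ _ _ _ _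

-- ===== VERDICT (by name: the statement is the Claim_ definition above) =====
theorem classify_device_real_py_spec : Claim_equal_classify_device_real_py := by
  intro vendor hostname ip _
  exact classify_eq vendor hostname ip
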